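-- pv_equiv track=rewrite | github.com/pypi-data/pypi-mirror-403 | packages/tabwrap/tabwrap-1.3.1-py3-none-any.whl/tabwrap/latex/error_handling.py | validate_tex_content_syntax
-- ===== SOURCE A (Python) =====
-- def validate_tex_content_syntax(content: str) -> list[str]:
--     """Basic syntax validation for common LaTeX errors."""
--     issues = []
--
--     # Check for unmatched braces
--     brace_count = content.count("{") - content.count("}")
--     if brace_count != 0:
--         issues.append(f"Unmatched braces: {abs(brace_count)} {'extra {' if brace_count > 0 else 'missing }'}")
--
--     # Check for table environment issues
--     if "begin{table}" in content:
--         if "end{table}" not in content: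
--             issues.append("Missing \\end{table}")
--
--     # Check for tabular environment issues
--     if "begin{tabular}" in content:
--         if "end{tabular}" not in content:
--             issues.append("Missing \\end{tabular}")
--
--         # Check for lines ending without \\
--         # Accumulate content across lines to handle multi-line rows
--         lines = content.split("\n")
--         accumulated = ""
--         for line in lines:
--             stripped = line.strip()
--             accumulated += " " + stripped
--
--             # If line ends with \\, we have a complete row - reset accumulator
--             if stripped.endswith("\\\\") or stripped.endswith("\\"):
--                 accumulated = ""
--             # Skip lines inside environments or special commands
--             elif "begin{" in stripped or "end{" in stripped:
--                 accumulated = ""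
--             elif "toprule" in stripped or "midrule" in stripped or "bottomrule" in stripped:
--                 accumulated = ""
--
--         # After processing all lines, check if there's unfinished row content with &
--         if accumulated.strip() and "&" in accumulated:
--             issues.append("Table row contains & but never ends with \\\\")
--
--     return issues
-- ===== SOURCE B (Python) =====
-- def _is_reset(s: str) -> bool:
--     return (s.endswith("\\\\") or s.endswith("\\")
--             or "begin{" in s or "end{" in s
--             or "toprule" in s or "midrule" in s or "bottomrule" in s)
--
--
-- def _tail_after_last_reset(stripped: list[str]) -> list[str]:
--     i = len(stripped)
--     while i > 0 and not _is_reset(stripped[i - 1]):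
--         i -= 1
--     return stripped[i:]
--
--
-- def validate_tex_content_syntax(content: str) -> list[str]:
--     """Basic syntax validation for common LaTeX errors (check-table variant)."""
--     stripped = [line.strip() for line in content.split("\n")]
--     joined = " ".join(_tail_after_last_reset(stripped))
--     bc = content.count("{") - content.count("}")
--     has_tabular = "begin{tabular}" in content
--     checks = [
--         (bc != 0,
--          f"Unmatched braces: {abs(bc)} {'extra {' if bc > 0 else 'missing }'}"),
--         ("begin{table}" in content and "end{table}" not in content,
--          "Missing \\end{table}"),
--         (has_tabular and "end{tabular}" not in content,
--          "Missing \\end{tabular}"),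
--         (has_tabular and bool(joined.strip()) and "&" in joined,
--          "Table row contains & but never ends with \\\\"),
--     ]
--     return [msg for ok, msg in checks if ok]
-- ===== Notes on version B (the rewrite author's own statement) =====
-- stated objective: alternative
-- what changed: A's forward accumulator loop and chained conditional appends are replaced by staged passes: strip all lines once, locate the last reset line with a backward index search and slice the tail after it, join it once, and build the result by filtering a literal table of (condition, message) checks.
import Mathlib
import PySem

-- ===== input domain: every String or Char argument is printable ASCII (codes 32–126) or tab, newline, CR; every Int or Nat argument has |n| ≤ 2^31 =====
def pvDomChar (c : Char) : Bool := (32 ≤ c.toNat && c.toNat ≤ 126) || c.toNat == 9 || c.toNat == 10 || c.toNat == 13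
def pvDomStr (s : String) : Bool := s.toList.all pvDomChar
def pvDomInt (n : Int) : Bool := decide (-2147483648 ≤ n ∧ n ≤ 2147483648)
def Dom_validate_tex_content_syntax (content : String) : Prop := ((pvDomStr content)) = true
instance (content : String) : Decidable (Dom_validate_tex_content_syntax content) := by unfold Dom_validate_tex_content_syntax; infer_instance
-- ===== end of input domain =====

-- B replaces A's forward accumulator loop and chained conditional appends by staged
-- passes: strip all lines, find the last reset line by a backward index search, slice
-- and join the tail after it once, and filter a literal table of (condition, message)
-- checks (alternative decomposition, same cost). Return value only; no mutation.

-- ===== PORT A =====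
def pvBraceIssue (bc : Int) : String :=
  String.ofList ("Unmatched braces: ".toList ++ (PySem.Int.toStr (bc.natAbs : Int)).toList
    ++ " ".toList ++ (if bc > 0 then "extra {" else "missing }").toList)

-- A's per-line accumulator step, with the if/elif chain in source order
def pvStepA (acc : List Char) (line : List Char) : List Char :=
  let stripped := PySem.Chars.strip line
  let acc2 := acc ++ (' ' :: stripped)
  if PySem.Chars.endswith stripped "\\\\".toList || PySem.Chars.endswith stripped "\\".toList then []
  else if PySem.Chars.isIn "begin{".toList stripped || PySem.Chars.isIn "end{".toList stripped then []
  else if PySem.Chars.isIn "toprule".toList stripped || PySem.Chars.isIn "midrule".toList stripped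
        || PySem.Chars.isIn "bottomrule".toList stripped then []
  else acc2

def validate_tex_content_syntax (content : String) : List String :=
  let cs := content.toList
  let issues : List String := []
  let brace_count : Int := (PySem.Chars.count cs "{".toList : Int) - (PySem.Chars.count cs "}".toList : Int)
  let issues := if brace_count ≠ 0 then issues ++ [pvBraceIssue brace_count] else issues
  let issues :=
    if PySem.Chars.isIn "begin{table}".toList cs then
      if !PySem.Chars.isIn "end{table}".toList cs then issues ++ ["Missing \\end{table}"] else issues
    else issues
  if PySem.Chars.isIn "begin{tabular}".toList cs then
    let issues := if !PySem.Chars.isIn "end{tabular}".toList cs then issues ++ ["Missing \\end{tabular}"] else issues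
    let lines := PySem.Chars.splitOn cs "\n".toList
    let accumulated := lines.foldl pvStepA []
    if PySem.Chars.strip accumulated ≠ [] && PySem.Chars.isIn "&".toList accumulated then
      issues ++ ["Table row contains & but never ends with \\\\"]
    else issues
  else issues

-- ===== PORT B =====
-- B's _is_reset helper (one flat disjunction)
def pvIsReset (s : List Char) : Bool :=
  PySem.Chars.endswith s "\\\\".toList || PySem.Chars.endswith s "\\".toList
  || PySem.Chars.isIn "begin{".toList s || PySem.Chars.isIn "end{".toList s
  || PySem.Chars.isIn "toprule".toList s || PySem.Chars.isIn "midrule".toList s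
  || PySem.Chars.isIn "bottomrule".toList s

-- B's backward while-loop (`while i > 0 and not _is_reset(stripped[i-1]): i -= 1`),
-- as structural recursion on the index; stripped[i-1] has 0 ≤ i-1 < len, so getD is exact
def pvTailStart (ss : List (List Char)) : Nat → Nat
  | 0 => 0
  | i + 1 => if pvIsReset (ss.getD i []) then i + 1 else pvTailStart ss i

def validate_tex_content_syntax_alt (content : String) : List String :=
  let cs := content.toList
  let stripped := (PySem.Chars.splitOn cs "\n".toList).map PySem.Chars.strip
  let tail := stripped.drop (pvTailStart stripped stripped.length)
  let joined := PySem.Chars.join " ".toList tail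
  let bc : Int := (PySem.Chars.count cs "{".toList : Int) - (PySem.Chars.count cs "}".toList : Int)
  let has_tabular := PySem.Chars.isIn "begin{tabular}".toList cs
  let checks : List (Bool × String) :=
    [(bc != 0, pvBraceIssue bc),
     (PySem.Chars.isIn "begin{table}".toList cs && !PySem.Chars.isIn "end{table}".toList cs,
      "Missing \\end{table}"),
     (has_tabular && !PySem.Chars.isIn "end{tabular}".toList cs, "Missing \\end{tabular}"),
     (has_tabular && !(PySem.Chars.strip joined == []) && PySem.Chars.isIn "&".toList joined,
      "Table row contains & but never ends with \\\\")]
  (checks.filter (·.1)).map (·.2)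

-- ===== PRECONDITION & SPEC =====
def Spec_validate_tex_content_syntax (content : String) (out : List String) : Prop := out = validate_tex_content_syntax_alt content
instance (content : String) (out : List String) : Decidable (Spec_validate_tex_content_syntax content out) := by unfold Spec_validate_tex_content_syntax; infer_instance

-- ===== CLAIM (what is proved, stated in full; the proofs are below) =====
def Claim_equal_validate_tex_content_syntax : Prop := ∀ (content : String), Dom_validate_tex_content_syntax content → Spec_validate_tex_content_syntax content (validate_tex_content_syntax content)

-- ===== LEMMAS AND PROOFS =====

-- A's step is "reset to [] or append", driven by exactly B's reset predicate
theorem pvStepA_eq (acc line : List Char) :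
    pvStepA acc line =
      if pvIsReset (PySem.Chars.strip line) then []
      else acc ++ (' ' :: PySem.Chars.strip line) := by
  simp only [pvStepA, pvIsReset, Bool.or_assoc]
  split_ifs with h1 h2 h3 <;> simp_all

-- pvTailStart only inspects indices below i, so a right extension is irrelevant
theorem pvTailStart_append (ss ts : List (List Char)) (i : Nat) (hi : i ≤ ss.length) :
    pvTailStart (ss ++ ts) i = pvTailStart ss i := by
  induction i with
  | zero => rfl
  | succ i ih =>
    have hlt : i < ss.length := hi
    simp only [pvTailStart, List.getD_append _ _ _ _ hlt, ih (Nat.le_of_lt hlt)]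

theorem pvTailStart_le (ss : List (List Char)) (i : Nat) : pvTailStart ss i ≤ i := by
  induction i with
  | zero => exact Nat.le_refl 0
  | succ i ih =>
    simp only [pvTailStart]
    split
    · exact Nat.le_refl _
    · exact Nat.le_succ_of_le ih

-- B's slice after the backward search = reversed takeWhile of the reversed list
theorem pvDrop_tailStart (ss : List (List Char)) :
    ss.drop (pvTailStart ss ss.length) =
      (ss.reverse.takeWhile (fun s => !pvIsReset s)).reverse := by
  induction ss using List.reverseRecOn with
  | nil => rfl
  | append_singleton ss s ih =>
    have hlen : (ss ++ [s]).length = ss.length + 1 := by simp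
    rw [hlen]
    have hget : (ss ++ [s]).getD ss.length [] = s := by simp
    simp only [pvTailStart, hget]
    by_cases h : pvIsReset s = true
    · simp [h, List.drop_eq_nil_of_le]
    · simp only [Bool.not_eq_true] at h
      rw [if_neg (by simp [h]), pvTailStart_append ss [s] ss.length (Nat.le_refl _),
        List.drop_append_of_le_length (pvTailStart_le ss ss.length), ih]
      simp [h]

-- A's tail (accumulated pieces) strips inside; B strips in a separate pass first
theorem pvTakeWhile_map_strip (xs : List (List Char)) :
    ((xs.map PySem.Chars.strip).takeWhile (fun s => !pvIsReset s)) =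
      (xs.takeWhile (fun l => !pvIsReset (PySem.Chars.strip l))).map PySem.Chars.strip := by
  induction xs with
  | nil => rfl
  | cons x xs ih =>
    simp only [List.map_cons, List.takeWhile_cons]
    by_cases h : pvIsReset (PySem.Chars.strip x) = true <;> simp [h, ih]

-- the accumulator after A's loop is the flattened post-last-reset tail
theorem pvFoldA_eq (lines : List (List Char)) :
    lines.foldl pvStepA [] =
      (((lines.reverse.takeWhile (fun l => !pvIsReset (PySem.Chars.strip l))).map
        PySem.Chars.strip).reverse).flatMap (fun t => ' ' :: t) := by
  induction lines using List.reverseRecOn with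
  | nil => simp
  | append_singleton ls l ih =>
    rw [List.foldl_append]
    simp only [List.foldl_cons, List.foldl_nil, pvStepA_eq, List.reverse_append,
      List.reverse_singleton, List.singleton_append, List.takeWhile_cons]
    by_cases h : pvIsReset (PySem.Chars.strip l) = true
    · simp [h]
    · simp only [Bool.not_eq_true] at h
      simp [h, ih]

-- flattening " "-prefixed pieces = a leading space before the " "-join
theorem pvFlat_eq_join (ts : List (List Char)) :
    ts.flatMap (fun t => ' ' :: t) =
      match ts with
      | [] => []
      | _ :: _ => ' ' :: PySem.Chars.join " ".toList ts := by
  induction ts with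
  | nil => simp
  | cons t ts ih =>
    cases ts with
    | nil => rw [PySem.Chars.join_singleton]; simp
    | cons t2 ts2 =>
      simp only [List.flatMap_cons] at ih ⊢
      rw [ih]
      simp [PySem.Chars.join_cons_cons]

theorem pvStrip_space_cons (j : List Char) : PySem.Chars.strip (' ' :: j) = PySem.Chars.strip j := by
  simp [PySem.Chars.strip, PySem.Chars.lstrip, PySem.Chars.isspace]

theorem pvIsIn_space_cons (j : List Char) :
    PySem.Chars.isIn ['&'] (' ' :: j) = PySem.Chars.isIn ['&'] j := by
  by_cases h : PySem.Chars.isIn ['&'] j = true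
  · have h2 : PySem.Chars.isIn ['&'] (' ' :: j) = true := by
      rw [PySem.Chars.isIn_iff_infix]
      exact ((PySem.Chars.isIn_iff_infix _ _).mp h).trans (List.suffix_cons ' ' j).isInfix
    rw [h, h2]
  · simp only [Bool.not_eq_true] at h
    have h' := (PySem.Chars.isIn_eq_false_iff _ _).mp h
    have h2 : PySem.Chars.isIn ['&'] (' ' :: j) = false := by
      rw [PySem.Chars.isIn_eq_false_iff]
      intro hc
      apply h'
      rcases hc with ⟨pre, suf, hps⟩
      cases pre with
      | nil =>
        exfalso
        injection (show ('&' :: suf : List Char) = ' ' :: j by simp only [List.nil_append] at hps; exact hps) with h1 _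
        exact absurd h1 (by decide)
      | cons c pre' =>
        refine ⟨pre', suf, ?_⟩
        have hj : pre' ++ '&' :: suf = j := by
          simp only [List.cons_append, List.cons.injEq] at hps
          simpa using hps.2
        simpa using hj
    rw [h2, h]

-- B's staged tail (strip pass, backward search, slice) in A-side terms
theorem pvTailB (lines : List (List Char)) :
    (lines.map PySem.Chars.strip).drop
        (pvTailStart (lines.map PySem.Chars.strip) (lines.map PySem.Chars.strip).length) =
      ((lines.reverse.takeWhile (fun l => !pvIsReset (PySem.Chars.strip l))).map
        PySem.Chars.strip).reverse := by
  rw [pvDrop_tailStart, ← List.map_reverse, pvTakeWhile_map_strip]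

-- both result shapes, with the shared booleans and the common tail list abstracted
theorem pvMerge (bc : Int) (bt et tab etab : Bool) (ts : List (List Char)) :
    (let issues : List String := []
     let issues := if bc ≠ 0 then issues ++ [pvBraceIssue bc] else issues
     let issues := if bt then if !et then issues ++ ["Missing \\end{table}"] else issues else issues
     if tab then
       let issues := if !etab then issues ++ ["Missing \\end{tabular}"] else issues
       let accumulated := ts.flatMap (fun t => ' ' :: t)
       if PySem.Chars.strip accumulated ≠ [] && PySem.Chars.isIn "&".toList accumulated then
         issues ++ ["Table row contains & but never ends with \\\\"]
       else issues
     else issues)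
    =
    (let joined := PySem.Chars.join " ".toList ts
     let checks : List (Bool × String) :=
       [(bc != 0, pvBraceIssue bc),
        (bt && !et, "Missing \\end{table}"),
        (tab && !etab, "Missing \\end{tabular}"),
        (tab && !(PySem.Chars.strip joined == []) && PySem.Chars.isIn "&".toList joined,
         "Table row contains & but never ends with \\\\")]
     (checks.filter (·.1)).map (·.2)) := by
  simp only [pvFlat_eq_join]
  by_cases hbc : bc = 0 <;>
  cases ts with
  | nil =>
    have h0 : PySem.Chars.strip ([] : List Char) = [] := rfl
    have h1 : PySem.Chars.isIn "&".toList ([] : List Char) = false := rfl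
    cases bt <;> cases et <;> cases tab <;> cases etab <;>
      simp [bne_iff_ne, hbc, PySem.Chars.join_nil, h0]
  | cons t ts' =>
    by_cases hs : PySem.Chars.strip (PySem.Chars.join [' '] (t :: ts')) = [] <;>
    by_cases ha : PySem.Chars.isIn ['&'] (PySem.Chars.join [' '] (t :: ts')) = true <;>
    cases bt <;> cases et <;> cases tab <;> cases etab <;>
      simp [bne_iff_ne, hbc, pvStrip_space_cons, pvIsIn_space_cons, hs, ha]

-- ===== VERDICT (by name: the statement is the Claim_ definition above) =====
set_option maxHeartbeats 1600000 in
theorem validate_tex_content_syntax_spec : Claim_equal_validate_tex_content_syntax := by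
  intro content _
  unfold Spec_validate_tex_content_syntax
  simp only [validate_tex_content_syntax, validate_tex_content_syntax_alt]
  rw [pvFoldA_eq, pvTailB]
  exact pvMerge _ _ _ _ _ _
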